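-- pv_equiv track=rewrite | github.com/masterfung/RocketU-Exercises | Week 1/codingbat.py | array123
-- ===== SOURCE A (Python) =====
-- def array123(nums):
-- 	count1 = 0
-- 	count2 = 0
-- 	count3 = 0
-- 	for i in nums:
-- 		if i == 1:
-- 			count1 += 1
-- 		if i == 2:
-- 			count2 += 1
-- 		if i == 3:
-- 			count3 += 1
-- 	if count1 >= 1 and count2 >= 1 and count3 >= 1:
-- 		return True
-- 	else:
-- 		return False
-- ===== SOURCE B (Python) =====
-- def array123(nums):
--     return 1 in nums and 2 in nums and 3 in nums
-- ===== Notes on version B (the rewrite author's own statement) =====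
-- stated objective: idiomatic
-- what changed: Replaces the three-counter accumulation loop with three direct membership tests (1 in nums and 2 in nums and 3 in nums), eliminating the counters entirely.
import Mathlib
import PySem

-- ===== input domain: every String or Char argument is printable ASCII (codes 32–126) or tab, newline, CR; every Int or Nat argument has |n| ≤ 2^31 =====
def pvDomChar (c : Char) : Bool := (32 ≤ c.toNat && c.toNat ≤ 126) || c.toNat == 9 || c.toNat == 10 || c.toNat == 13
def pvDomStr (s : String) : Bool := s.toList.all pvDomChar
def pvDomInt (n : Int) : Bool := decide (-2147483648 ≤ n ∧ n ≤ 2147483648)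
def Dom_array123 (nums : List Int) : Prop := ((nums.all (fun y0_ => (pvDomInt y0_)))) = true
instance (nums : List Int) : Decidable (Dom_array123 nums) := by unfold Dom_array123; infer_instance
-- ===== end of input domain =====

-- B replaces A's three-counter loop with three direct membership tests (idiomatic, same cost).


-- ===== PORT A =====
-- the loop maintaining count1, count2, count3, then the final comparison
def array123 (nums : List Int) : Bool :=
  let cs := nums.foldl
    (fun (c : Int × Int × Int) i =>
      let c1 := if i = 1 then c.1 + 1 else c.1
      let c2 := if i = 2 then c.2.1 + 1 else c.2.1
      let c3 := if i = 3 then c.2.2 + 1 else c.2.2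
      (c1, c2, c3))
    (0, 0, 0)
  if cs.1 ≥ 1 ∧ cs.2.1 ≥ 1 ∧ cs.2.2 ≥ 1 then true else false

-- ===== PORT B =====
-- "1 in nums and 2 in nums and 3 in nums"
def array123_alt (nums : List Int) : Bool :=
  nums.contains 1 && nums.contains 2 && nums.contains 3

-- ===== PRECONDITION & SPEC =====
def Spec_array123 (nums : List Int) (out : Bool) : Prop := out = array123_alt nums
instance (nums : List Int) (out : Bool) : Decidable (Spec_array123 nums out) := by unfold Spec_array123; infer_instance

-- ===== CLAIM (what is proved, stated in full; the proofs are below) =====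
def Claim_equal_array123 : Prop := ∀ (nums : List Int), Dom_array123 nums → Spec_array123 nums (array123 nums)

-- ===== LEMMAS AND PROOFS =====
-- Loop invariant: the fold's final counters are the initial ones plus the occurrence counts.
theorem array123_fold_eq (nums : List Int) (c : Int × Int × Int) :
    nums.foldl
      (fun (c : Int × Int × Int) i =>
        let c1 := if i = 1 then c.1 + 1 else c.1
        let c2 := if i = 2 then c.2.1 + 1 else c.2.1
        let c3 := if i = 3 then c.2.2 + 1 else c.2.2
        (c1, c2, c3))
      c
    = (c.1 + nums.count 1, c.2.1 + nums.count 2, c.2.2 + nums.count 3) := by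
  induction nums generalizing c with
  | nil => simp
  | cons x xs ih =>
    simp only [List.foldl_cons, ih, List.count_cons]
    obtain ⟨a, b, d⟩ := c
    simp only
    split_ifs with h1 h2 h3 h3' h2' h3'' h3''' <;>
      simp_all [beq_iff_eq] <;> ring

theorem count_pos_iff_contains (n : Int) (nums : List Int) :
    (1 : Int) ≤ (nums.count n : Int) ↔ nums.contains n = true := by
  rw [List.contains_iff_mem, ← List.count_pos_iff]
  omega

-- ===== VERDICT (by name: the statement is the Claim_ definition above) =====
theorem array123_spec : Claim_equal_array123 := by
  intro nums _
  unfold Spec_array123 array123 array123_alt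
  simp only [array123_fold_eq, zero_add, ge_iff_le]
  simp only [count_pos_iff_contains, List.contains_iff_mem]
  by_cases h1 : (1 : Int) ∈ nums <;> by_cases h2 : (2 : Int) ∈ nums <;>
    by_cases h3 : (3 : Int) ∈ nums <;> simp [h1, h2, h3]
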